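-- pv_equiv track=rewrite | github.com/adutev/Programming-0 | week4/winter_is_coming.py | winter_is_coming
-- ===== SOURCE A (Python) =====
-- def winter_is_coming(seasons):
--     start = 0
--     end = 0
--
--     for s in range(0, len(seasons)):
--         if seasons[s] == 'winter':
--             start = s
--             end = s
--         else:
--             end += 1
--     if end - start >= 5:
--         return True
--     else:
--         return False
-- ===== SOURCE B (Python) =====
-- def winter_is_coming(seasons):
--     count = 0
--     for s in reversed(seasons):
--         if s == 'winter':
--             break
--         count += 1
--     return count >= 5
-- ===== Notes on version B (the rewrite author's own statement) =====
-- stated objective: simpler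
-- what changed: B drops A's forward start/end index bookkeeping and instead counts the maximal trailing run of non-'winter' elements by a single backward scan with early break, returning count >= 5.
import Mathlib
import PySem

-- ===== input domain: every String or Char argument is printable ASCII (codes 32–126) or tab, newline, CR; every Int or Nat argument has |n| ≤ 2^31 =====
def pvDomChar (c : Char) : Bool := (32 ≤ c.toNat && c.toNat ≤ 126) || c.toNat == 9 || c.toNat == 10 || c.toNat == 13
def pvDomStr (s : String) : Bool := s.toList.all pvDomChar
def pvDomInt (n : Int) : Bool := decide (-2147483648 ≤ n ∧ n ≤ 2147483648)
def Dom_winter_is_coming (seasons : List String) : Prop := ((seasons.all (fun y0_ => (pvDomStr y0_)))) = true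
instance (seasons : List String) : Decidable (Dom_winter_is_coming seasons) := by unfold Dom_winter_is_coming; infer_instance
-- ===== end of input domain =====

-- B replaces A's forward start/end index bookkeeping by a single backward scan counting
-- the trailing run of non-'winter' elements (objective: simpler).

-- ===== PORT A =====
def winter_is_coming (seasons : List String) : Bool :=
  let st := (PySem.List.pyRange 0 (seasons.length : Int) 1).foldl
    (fun (st : Int × Int) s =>
      if PySem.List.pyGetD seasons s "" == "winter" then (s, s) else (st.1, st.2 + 1))
    (0, 0)
  if st.2 - st.1 ≥ 5 then true else false

-- ===== PORT B =====
-- count of the maximal prefix of non-'winter' elements (applied to the reversed list)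
def wicCount : List String → Int
  | [] => 0
  | x :: rest => if x == "winter" then 0 else wicCount rest + 1

def winter_is_coming_alt (seasons : List String) : Bool :=
  decide (wicCount seasons.reverse ≥ 5)

-- ===== PRECONDITION & SPEC =====
def Spec_winter_is_coming (seasons : List String) (out : Bool) : Prop := out = winter_is_coming_alt seasons
instance (seasons : List String) (out : Bool) : Decidable (Spec_winter_is_coming seasons out) := by unfold Spec_winter_is_coming; infer_instance

-- ===== CLAIM (what is proved, stated in full; the proofs are below) =====
def Claim_equal_winter_is_coming : Prop := ∀ (seasons : List String), Dom_winter_is_coming seasons → Spec_winter_is_coming seasons (winter_is_coming seasons)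

-- ===== LEMMAS AND PROOFS =====

-- ===== VERDICT (by name: the statement is the Claim_ definition above) =====
-- the loop body of A's port, over the fixed list xs
def wicStep (xs : List String) (st : Int × Int) (s : Int) : Int × Int :=
  if PySem.List.pyGetD xs s "" == "winter" then (s, s) else (st.1, st.2 + 1)

theorem wic_getD_append (ys : List String) (y : String) (s : Int)
    (h0 : 0 ≤ s) (h1 : s < (ys.length : Int)) :
    PySem.List.pyGetD (ys ++ [y]) s "" = PySem.List.pyGetD ys s "" := by
  rw [PySem.List.pyGetD_eq_getElem (ys ++ [y]) "" h0 (by simp; omega),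
      PySem.List.pyGetD_eq_getElem ys "" h0 h1]
  exact List.getElem_append_left (by omega)

theorem wic_foldl_congr (ys : List String) (y : String) (l : List Int)
    (hl : ∀ s ∈ l, 0 ≤ s ∧ s < (ys.length : Int)) (init : Int × Int) :
    l.foldl (wicStep (ys ++ [y])) init = l.foldl (wicStep ys) init := by
  induction l generalizing init with
  | nil => rfl
  | cons a t ih =>
    have ha := hl a (by simp)
    simp only [List.foldl_cons]
    rw [show wicStep (ys ++ [y]) init a = wicStep ys init a from by
      unfold wicStep; rw [wic_getD_append ys y a ha.1 ha.2]]
    exact ih (fun s hs => hl s (by simp [hs])) _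

theorem wic_invariant (seasons : List String) :
    (let st := (PySem.List.pyRange 0 (seasons.length : Int) 1).foldl (wicStep seasons) (0, 0)
     st.2 - st.1) = wicCount seasons.reverse := by
  induction seasons using List.reverseRecOn with
  | nil => simp [wicCount]
  | append_singleton ys y ih =>
    have hn : (0 : Int) ≤ (ys.length : Int) := by positivity
    simp only [List.length_append, List.length_singleton] at *
    rw [show ((ys.length + 1 : Nat) : Int) = (ys.length : Int) + 1 from by push_cast; ring]
    rw [PySem.List.pyRange_one_succ_right hn, List.foldl_append,
        wic_foldl_congr ys y (PySem.List.pyRange 0 (ys.length : Int) 1)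
          (fun s hs => by rw [PySem.List.mem_pyRange_one] at hs; exact hs)]
    have hy : PySem.List.pyGetD (ys ++ [y]) (ys.length : Int) "" = y := by
      rw [PySem.List.pyGetD_eq_getElem (ys ++ [y]) "" hn (by simp)]
      simp
    simp only [List.foldl_cons, List.foldl_nil, List.reverse_append,
      List.reverse_singleton, List.singleton_append, wicCount, wicStep, hy]
    by_cases hw : y == "winter"
    · simp [hw]
    · simp only [hw, Bool.false_eq_true, if_false]
      omega

theorem winter_is_coming_spec : Claim_equal_winter_is_coming := by
  intro seasons _
  unfold Spec_winter_is_coming winter_is_coming winter_is_coming_alt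
  have h := wic_invariant seasons
  rw [show (fun (st : Int × Int) s =>
      if PySem.List.pyGetD seasons s "" == "winter" then (s, s) else (st.1, st.2 + 1))
      = wicStep seasons from rfl]
  simp only [] at h ⊢
  rw [h]
  by_cases h5 : wicCount seasons.reverse ≥ 5 <;> simp [h5]
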